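-- pv_equiv track=rewrite | github.com/YukiNeko-hime/pricedisplay | pricedisplay/graphics.py | _GetLimits
-- ===== SOURCE A (Python) =====
-- def _GetLimits( visiblePrices ):
-- 	"""Find the minimum and maximum for the visible prices."""
--
-- 	# filter out None for comparing prices
-- 	filteredPrices = []
-- 	for price in visiblePrices:
-- 		if price != None:
-- 			filteredPrices.append( price )
--
-- 	# add zero for better visualization of prices
-- 	filteredPrices += [0]
--
-- 	minimum = min( filteredPrices )
-- 	maximum = max( filteredPrices )
--
-- 	return minimum, maximum
-- ===== SOURCE B (Python) =====
-- def _GetLimits( visiblePrices ):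
-- 	"""Find the minimum and maximum for the visible prices."""
-- 	minimum = 0
-- 	maximum = 0
-- 	for price in visiblePrices:
-- 		if price != None:
-- 			if price < minimum:
-- 				minimum = price
-- 			if price > maximum:
-- 				maximum = price
-- 	return minimum, maximum
-- ===== Notes on version B (the rewrite author's own statement) =====
-- stated objective: simpler
-- what changed: Replaced the filtered intermediate list plus the appended zero and the two library min/max calls by a single running-extrema loop whose minimum and maximum both start at zero, with no intermediate list.
import Mathlib
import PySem

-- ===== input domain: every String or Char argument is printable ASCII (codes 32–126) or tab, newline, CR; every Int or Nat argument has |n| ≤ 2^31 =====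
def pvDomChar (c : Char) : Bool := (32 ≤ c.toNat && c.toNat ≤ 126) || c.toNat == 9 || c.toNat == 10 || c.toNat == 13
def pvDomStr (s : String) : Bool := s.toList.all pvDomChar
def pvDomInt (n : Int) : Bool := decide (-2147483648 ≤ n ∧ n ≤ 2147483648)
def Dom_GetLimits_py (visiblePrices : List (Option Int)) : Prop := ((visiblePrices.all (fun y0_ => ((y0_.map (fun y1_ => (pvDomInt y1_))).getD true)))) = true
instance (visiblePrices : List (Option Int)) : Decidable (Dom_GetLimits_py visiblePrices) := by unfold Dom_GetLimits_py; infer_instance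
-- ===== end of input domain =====

-- B: single running-extrema pass starting at (0,0) instead of A's filtered list + appended 0 + min()/max() — simpler, one pass, no intermediate list.


-- ===== PORT A =====
-- filteredPrices loop; then filteredPrices += [0]; then min()/max().
-- The list min()/max() is taken ends up nonempty (it contains 0), so Python's min/max
-- never raise here; the .getD 0 default is unreachable.
def GetLimits_py (visiblePrices : List (Option Int)) : Int × Int :=
  let filteredPrices :=
    visiblePrices.foldl (fun acc price =>
      match price with
      | some v => acc ++ [v]
      | none => acc) []
  let fp := filteredPrices ++ [0]
  ((PySem.List.min? fp (fun x => x)).getD 0, (PySem.List.max? fp (fun x => x)).getD 0)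

-- ===== PORT B =====
def GetLimits_py_alt (visiblePrices : List (Option Int)) : Int × Int :=
  visiblePrices.foldl (fun (s : Int × Int) price =>
    match price with
    | none => s
    | some v => ((if v < s.1 then v else s.1), (if v > s.2 then v else s.2))) (0, 0)

-- ===== PRECONDITION & SPEC =====
def Spec_GetLimits_py (visiblePrices : List (Option Int)) (out : Int × Int) : Prop := out = GetLimits_py_alt visiblePrices
instance (visiblePrices : List (Option Int)) (out : Int × Int) : Decidable (Spec_GetLimits_py visiblePrices out) := by unfold Spec_GetLimits_py; infer_instance

-- ===== CLAIM (what is proved, stated in full; the proofs are below) =====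
def Claim_equal_GetLimits_py : Prop := ∀ (visiblePrices : List (Option Int)), Dom_GetLimits_py visiblePrices → Spec_GetLimits_py visiblePrices (GetLimits_py visiblePrices)

-- ===== LEMMAS AND PROOFS =====

theorem pvFoldlMin (l : List Int) : ∀ (a b : Int),
    List.foldl min (min a b) l = min a (List.foldl min b l) := by
  induction l with
  | nil => intro a b; rfl
  | cons c t ih =>
    intro a b
    simp only [List.foldl_cons, min_assoc]
    exact ih a (min b c)

theorem pvFoldlMax (l : List Int) : ∀ (a b : Int),
    List.foldl max (max a b) l = max a (List.foldl max b l) := by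
  induction l with
  | nil => intro a b; rfl
  | cons c t ih =>
    intro a b
    simp only [List.foldl_cons, max_assoc]
    exact ih a (max b c)

-- A's accumulation loop builds acc ++ filterMap id
theorem pvFilterFold (l : List (Option Int)) : ∀ (acc : List Int),
    l.foldl (fun acc price =>
      match price with
      | some v => acc ++ [v]
      | none => acc) acc = acc ++ l.filterMap id := by
  induction l with
  | nil => intro acc; simp
  | cons p t ih =>
    intro acc
    cases p <;> simp [ih]

-- B's loop computes running min/max over the filtered values
theorem pvAltFold (l : List (Option Int)) : ∀ (mn mx : Int),
    l.foldl (fun (s : Int × Int) price =>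
      match price with
      | none => s
      | some v => ((if v < s.1 then v else s.1), (if v > s.2 then v else s.2))) (mn, mx)
      = (List.foldl min mn (l.filterMap id), List.foldl max mx (l.filterMap id)) := by
  induction l with
  | nil => intro mn mx; simp
  | cons p t ih =>
    intro mn mx
    cases p with
    | none => simpa using ih mn mx
    | some v =>
      simp only [List.filterMap_cons, id, List.foldl_cons]
      have h1 : (if v < mn then v else mn) = min mn v := by
        simp [min_def]; omega
      have h2 : (if v > mx then v else mx) = max mx v := by
        simp [max_def]; omega
      simpa [h1, h2] using ih (min mn v) (max mx v)

theorem pvMinAppendZero (f : List Int) :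
    (PySem.List.min? (f ++ [0]) (fun x => x)).getD 0 = List.foldl min 0 f := by
  cases f with
  | nil => decide
  | cons a t =>
    rw [List.cons_append, PySem.List.min?_id_cons]
    simp only [Option.getD_some, List.foldl_append, List.foldl_cons, List.foldl_nil]
    rw [min_comm (List.foldl min a t) 0, ← pvFoldlMin t 0 a]

theorem pvMaxAppendZero (f : List Int) :
    (PySem.List.max? (f ++ [0]) (fun x => x)).getD 0 = List.foldl max 0 f := by
  cases f with
  | nil => decide
  | cons a t =>
    rw [List.cons_append, PySem.List.max?_id_cons]
    simp only [Option.getD_some, List.foldl_append, List.foldl_cons, List.foldl_nil]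
    rw [max_comm (List.foldl max a t) 0, ← pvFoldlMax t 0 a]


-- ===== VERDICT (by name: the statement is the Claim_ definition above) =====
theorem GetLimits_py_spec : Claim_equal_GetLimits_py := by
  intro vp _
  unfold Spec_GetLimits_py
  simp only [GetLimits_py, GetLimits_py_alt, pvFilterFold vp [], List.nil_append,
    pvAltFold vp 0 0, pvMinAppendZero, pvMaxAppendZero]
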